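-- pv_equiv track=rewrite | github.com/donataso/leetcode-py | problems/n2483_minimum_penalty_for_a_shop.py | even_faster
-- ===== SOURCE A (Python) =====
-- def even_faster(customers: str) -> int:
--     min_fine = fine = closing_hour = 0
--
--     for i, c in enumerate(customers):
--         if c == 'N':
--             fine += 1
--         else:
--             fine -= 1
--
--             if fine < min_fine:
--                 min_fine = fine
--                 closing_hour = i + 1
--
--     return closing_hour
-- ===== SOURCE B (Python) =====
-- def even_faster(customers: str) -> int:
--     pref = []            # pref[i] = number of 'N' in customers[:i+1]
--     acc = 0
--     for c in customers:
--         acc += (1 if c == 'N' else 0)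
--         pref.append(acc)
--     totalY = len(customers) - acc
--     best_k = 0
--     best_p = totalY      # penalty of closing at hour 0
--     for k, pN in enumerate(pref, 1):
--         p = 2 * pN - k + totalY
--         if p < best_p:
--             best_p = p
--             best_k = k
--     return best_k
-- ===== Notes on version B (the rewrite author's own statement) =====
-- stated objective: alternative
-- what changed: Replaces A's single running-delta pass (fine updated in place, minimum checked only inside the customer-present branch) with a two-phase decomposition: first build a prefix table of no-customer counts, then a separate scan that evaluates the absolute penalty at every closing hour and keeps the earliest strict minimum.
import Mathlib
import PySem

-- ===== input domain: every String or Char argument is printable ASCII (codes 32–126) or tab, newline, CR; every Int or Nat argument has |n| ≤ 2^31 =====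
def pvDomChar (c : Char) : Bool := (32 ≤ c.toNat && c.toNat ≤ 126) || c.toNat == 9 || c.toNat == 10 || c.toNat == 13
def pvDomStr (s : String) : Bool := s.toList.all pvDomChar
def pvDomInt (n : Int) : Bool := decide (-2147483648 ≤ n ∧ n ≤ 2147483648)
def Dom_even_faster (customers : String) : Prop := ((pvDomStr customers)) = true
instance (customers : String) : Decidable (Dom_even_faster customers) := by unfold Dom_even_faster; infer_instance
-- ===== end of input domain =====

-- B replaces A's running-delta pass by a prefix-count table followed by a separate
-- penalty-evaluation scan (alternative decomposition, same linear cost).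

-- ===== PORT A =====
def evfStepA (st : Int × Int × Int) (ic : Int × Char) : Int × Int × Int :=
  if ic.2 = 'N' then (st.1, st.2.1 + 1, st.2.2)
  else
    let fine' := st.2.1 - 1
    if fine' < st.1 then (fine', fine', ic.1 + 1)
    else (st.1, fine', st.2.2)

def even_faster (customers : String) : Int :=
  ((PySem.List.enumerate customers.toList 0).foldl evfStepA (0, 0, 0)).2.2

-- ===== PORT B =====
-- phase 1: build the prefix table of running 'N'-counts (list so far, running acc)
def evfPrefStep (st : List Int × Int) (c : Char) : List Int × Int :=
  let acc' := st.2 + (if c = 'N' then 1 else 0)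
  (st.1 ++ [acc'], acc')

-- phase 2: scan all closing hours k, keeping the earliest strict minimum penalty
def evfScanStep (T : Int) (b : Int × Int) (kp : Int × Int) : Int × Int :=
  let p := 2 * kp.2 - kp.1 + T
  if p < b.2 then (kp.1, p) else b

def even_faster_alt (customers : String) : Int :=
  ((PySem.List.enumerate (customers.toList.foldl evfPrefStep ([], 0)).1 1).foldl
      (evfScanStep ((customers.toList.length : Int) - (customers.toList.foldl evfPrefStep ([], 0)).2))
      (0, (customers.toList.length : Int) - (customers.toList.foldl evfPrefStep ([], 0)).2)).1

-- ===== PRECONDITION & SPEC =====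
def Spec_even_faster (customers : String) (out : Int) : Prop := out = even_faster_alt customers
instance (customers : String) (out : Int) : Decidable (Spec_even_faster customers out) := by unfold Spec_even_faster; infer_instance

-- ===== CLAIM (what is proved, stated in full; the proofs are below) =====
def Claim_equal_even_faster : Prop := ∀ (customers : String), Dom_even_faster customers → Spec_even_faster customers (even_faster customers)

-- ===== LEMMAS AND PROOFS =====

-- the prefix table as a plain structural recursion (proof helper)
def evfPrefTail : List Char → Int → List Int
  | [], _ => []
  | c :: cs, a =>
      let a' := a + (if c = 'N' then 1 else 0)
      a' :: evfPrefTail cs a'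

theorem evfPref_eq (cs : List Char) : ∀ (l : List Int) (a : Int),
    (cs.foldl evfPrefStep (l, a)).1 = l ++ evfPrefTail cs a := by
  induction cs with
  | nil => intro l a; simp [evfPrefTail]
  | cons c cs ih =>
      intro l a
      simp only [List.foldl_cons, evfPrefStep, evfPrefTail]
      rw [ih]
      simp

-- main invariant: A's fold state (min_fine, fine, closing) with fine = 2a - i and
-- min_fine ≤ fine corresponds to B's scan state (closing, min_fine + T)
theorem evf_inv (cs : List Char) : ∀ (i a m f cl T : Int),
    f = 2 * a - i → m ≤ f →
    (PySem.List.enumerate (evfPrefTail cs a) (i + 1)).foldl (evfScanStep T) (cl, m + T)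
      = (((PySem.List.enumerate cs i).foldl evfStepA (m, f, cl)).2.2,
         ((PySem.List.enumerate cs i).foldl evfStepA (m, f, cl)).1 + T) := by
  induction cs with
  | nil => intro i a m f cl T hf hm; simp [evfPrefTail, PySem.List.enumerate_nil]
  | cons c cs ih =>
      intro i a m f cl T hf hm
      simp only [evfPrefTail, PySem.List.enumerate_cons, List.foldl_cons]
      by_cases hc : c = 'N'
      · have ha : (if c = 'N' then (1 : Int) else 0) = 1 := by simp [hc]
        rw [ha]
        have e1 : evfStepA (m, f, cl) (i, c) = (m, f + 1, cl) := by simp [evfStepA, hc]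
        have e2 : evfScanStep T (cl, m + T) (i + 1, a + 1) = (cl, m + T) := by
          simp only [evfScanStep]; rw [if_neg (by omega)]
        rw [e1, e2]
        exact ih (i + 1) (a + 1) m (f + 1) cl T (by omega) (by omega)
      · have ha : (if c = 'N' then (1 : Int) else 0) = 0 := by simp [hc]
        rw [ha]
        by_cases hlt : f - 1 < m
        · have e1 : evfStepA (m, f, cl) (i, c) = (f - 1, f - 1, i + 1) := by
            simp [evfStepA, hc, hlt]
          have e2 : evfScanStep T (cl, m + T) (i + 1, a + 0) = (i + 1, (f - 1) + T) := by
            simp only [evfScanStep]; rw [if_pos (by omega)]; congr 1; omega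
          rw [e1, e2]
          exact ih (i + 1) (a + 0) (f - 1) (f - 1) (i + 1) T (by omega) (by omega)
        · have e1 : evfStepA (m, f, cl) (i, c) = (m, f - 1, cl) := by
            simp [evfStepA, hc, hlt]
          have e2 : evfScanStep T (cl, m + T) (i + 1, a + 0) = (cl, m + T) := by
            simp only [evfScanStep]; rw [if_neg (by omega)]
          rw [e1, e2]
          exact ih (i + 1) (a + 0) m (f - 1) cl T (by omega) (by omega)

-- ===== VERDICT (by name: the statement is the Claim_ definition above) =====
theorem even_faster_spec : Claim_equal_even_faster := by
  intro customers _
  unfold Spec_even_faster even_faster even_faster_alt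
  rw [evfPref_eq]
  have h := evf_inv customers.toList 0 0 0 0 0
    ((customers.toList.length : Int) - (customers.toList.foldl evfPrefStep ([], 0)).2)
    (by ring) (le_refl 0)
  simp only [zero_add, List.nil_append] at h ⊢
  rw [h]
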